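-- pv_equiv track=rewrite | github.com/RikVN/Neural_DRS | src/drs_jury.py | get_key_list
-- ===== SOURCE A (Python) =====
-- def get_key_list(avg_clause_list, all_keys=[]):
--     '''Get a list of all keys (clauses) we will be checking'''
--     key_list = []
--     for avg_clause in avg_clause_list:
--         keys_and_gold = []
--         for key in avg_clause:
--             if not all_keys or key in all_keys:
--                 keys_and_gold.append([key, avg_clause[key][2]])
--         sorted_keys = sorted(keys_and_gold, key=lambda x: x[1], reverse=True)
--         for add_key in sorted_keys:
--             if add_key[0] not in key_list:
--                 key_list.append(add_key[0])
--     return key_list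
-- ===== SOURCE B (Python) =====
-- def get_key_list(avg_clause_list, all_keys=[]):
--     '''Get a list of all keys (clauses) we will be checking'''
--     # one flat table of (clause_index, gold, key) records
--     records = []
--     for idx, avg_clause in enumerate(avg_clause_list):
--         for key in avg_clause:
--             if not all_keys or key in all_keys:
--                 records.append((idx, avg_clause[key][2], key))
--     # two composed stable sorts: gold descending, then clause index ascending
--     records = sorted(records, key=lambda r: r[1], reverse=True)
--     records = sorted(records, key=lambda r: r[0])
--     # single dedup pass, first occurrence wins
--     key_list = []
--     seen = set()
--     for _, _, key in records:
--         if key not in seen: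
--             seen.add(key)
--             key_list.append(key)
--     return key_list
-- ===== Notes on version B (the rewrite author's own statement) =====
-- stated objective: alternative
-- what changed: Replaces A's per-clause sort-and-interleave (build pair list, sort it, merge into key_list with a linear 'not in' scan per clause) by a build-once flat record table (clause_index, gold, key), two composed stable sorts giving one globally ordered list, and a single dedup pass over it with a seen-set.
import Mathlib
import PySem

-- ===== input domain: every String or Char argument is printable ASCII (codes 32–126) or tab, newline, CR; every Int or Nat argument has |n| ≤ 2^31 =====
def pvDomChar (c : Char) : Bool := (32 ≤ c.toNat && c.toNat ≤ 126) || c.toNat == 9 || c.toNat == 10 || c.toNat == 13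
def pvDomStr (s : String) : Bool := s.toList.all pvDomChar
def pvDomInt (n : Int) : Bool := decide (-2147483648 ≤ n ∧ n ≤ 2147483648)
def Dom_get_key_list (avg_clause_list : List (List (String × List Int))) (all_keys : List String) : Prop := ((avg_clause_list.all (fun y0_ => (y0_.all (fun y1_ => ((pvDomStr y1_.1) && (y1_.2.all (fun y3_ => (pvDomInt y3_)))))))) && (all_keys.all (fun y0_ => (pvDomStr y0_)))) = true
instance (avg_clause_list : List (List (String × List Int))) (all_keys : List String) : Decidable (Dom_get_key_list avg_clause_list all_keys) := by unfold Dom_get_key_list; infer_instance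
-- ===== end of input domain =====

-- B replaces A's per-clause sort-and-interleave by one flat record table, two composed
-- stable sorts (gold descending, then clause index) and a single first-seen dedup pass
-- (objective: alternative decomposition, same results).

-- ===== PORT A =====
-- shared helper: the expression avg_clause[key][2] (dict lookup, then index 2).
-- The .getD defaults are never reached on Pre_ inputs: the key comes from the dict itself
-- and Pre_ guarantees its value list has at least 3 elements.
def pvGold (avg_clause : List (String × List Int)) (key : String) : Int :=
  PySem.List.pyGetD ((PySem.Dict.get? ⟨avg_clause⟩ key).getD []) 2 0

def get_key_list (avg_clause_list : List (List (String × List Int))) (all_keys : List String) : List String :=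
  avg_clause_list.foldl (fun key_list avg_clause =>
    let keys_and_gold : List (String × Int) :=
      (avg_clause.map Prod.fst).foldl (fun kg key =>
        if all_keys.isEmpty || all_keys.contains key then
          kg ++ [(key, pvGold avg_clause key)] else kg) []
    let sorted_keys := PySem.List.sorted keys_and_gold (fun x => x.2) true
    sorted_keys.foldl (fun kl add_key =>
      if kl.contains add_key.1 then kl else kl ++ [add_key.1]) key_list) []

-- ===== PORT B =====
def get_key_list_alt (avg_clause_list : List (List (String × List Int))) (all_keys : List String) : List String :=
  let records : List (Int × Int × String) :=
    (PySem.List.enumerate avg_clause_list 0).foldl (fun rs p =>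
      (p.2.map Prod.fst).foldl (fun rs key =>
        if all_keys.isEmpty || all_keys.contains key then
          rs ++ [(p.1, pvGold p.2 key, key)] else rs) rs) []
  let byGold := PySem.List.sorted records (fun r => r.2.1) true
  let byClause := PySem.List.sorted byGold (fun r => r.1)
  (byClause.foldl (fun (st : List String × PySem.Set String) r =>
      if PySem.Set.contains st.2 r.2.2 then st
      else (st.1 ++ [r.2.2], PySem.Set.add st.2 r.2.2)) ([], PySem.Set.empty)).1

-- ===== PRECONDITION & SPEC =====
-- Pre_ excludes (a) clauses whose association list repeats a key — a Python dict cannot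
-- contain duplicate keys, so such lists represent no Python dict input — and (b) inputs
-- where a selected key's value list has fewer than 3 elements, on which Python A raises
-- IndexError.
def Pre_get_key_list (avg_clause_list : List (List (String × List Int))) (all_keys : List String) : Prop :=
  ∀ c ∈ avg_clause_list, (c.map Prod.fst).Nodup ∧
    ∀ p ∈ c, (all_keys = [] ∨ p.1 ∈ all_keys) → 3 ≤ p.2.length
instance (avg_clause_list : List (List (String × List Int))) (all_keys : List String) : Decidable (Pre_get_key_list avg_clause_list all_keys) := by unfold Pre_get_key_list; infer_instance

def pvWitness_get_key_list : (List (List (String × List Int))) × List String :=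
  ([[("a", [1, 2, 5]), ("b", [0, 0, 2])], [("c", [0, 0, 9])]], [])

def Spec_get_key_list (avg_clause_list : List (List (String × List Int))) (all_keys : List String) (out : List String) : Prop := out = get_key_list_alt avg_clause_list all_keys
instance (avg_clause_list : List (List (String × List Int))) (all_keys : List String) (out : List String) : Decidable (Spec_get_key_list avg_clause_list all_keys out) := by unfold Spec_get_key_list; infer_instance

-- ===== CLAIM (what is proved, stated in full; the proofs are below) =====
def Claim_equal_get_key_list : Prop := ∀ (avg_clause_list : List (List (String × List Int))) (all_keys : List String), Dom_get_key_list avg_clause_list all_keys → Pre_get_key_list avg_clause_list all_keys → Spec_get_key_list avg_clause_list all_keys (get_key_list avg_clause_list all_keys)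

-- ===== LEMMAS AND PROOFS =====

-- proof-side abbreviations for the pieces both programs build
def pvFkeys (ak : List String) (c : List (String × List Int)) : List String :=
  (c.map Prod.fst).filter (fun key => ak.isEmpty || ak.contains key)
def pvPairs (ak : List String) (c : List (String × List Int)) : List (String × Int) :=
  (pvFkeys ak c).map (fun k => (k, pvGold c k))
def pvRecs (ak : List String) (i : Int) (c : List (String × List Int)) : List (Int × Int × String) :=
  (pvFkeys ak c).map (fun k => (i, pvGold c k, k))
def pvSadd (kl : List String) (k : String) : List String :=
  if kl.contains k then kl else kl ++ [k]
def pvLA (ak : List String) (acl : List (List (String × List Int))) : List String :=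
  acl.flatMap (fun c => (PySem.List.sorted (pvPairs ak c) (fun x => x.2) true).map Prod.fst)
def pvT (ak : List String) (acl : List (List (String × List Int))) (s : Int) : List (Int × Int × String) :=
  (PySem.List.enumerate acl s).flatMap (fun p => PySem.List.sorted (pvRecs ak p.1 p.2) (fun r => r.2.1) true)

-- ---------- generic facts about stable insertion sort (PySem.List.sorted) ----------

theorem pvIns_front {α : Type} (before : α → α → Bool) (x : α) (l : List α)
    (h : ∀ z ∈ l, before x z = true) : PySem.List.insertBy before x l = x :: l := by
  cases l with
  | nil => rfl
  | cons y ys =>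
    show (if before x y then x :: y :: ys else y :: PySem.List.insertBy before x ys) = _
    rw [if_pos (h y (List.mem_cons_self ..))]

theorem pvIns_pairwise {α : Type} (before : α → α → Bool)
    (hirr : ∀ a, before a a = false)
    (h2 : ∀ x y z, before x y = true → before z y = false → before z x = false)
    (l : List α) (x : α) (hl : l.Pairwise (fun a b => before b a = false)) :
    (PySem.List.insertBy before x l).Pairwise (fun a b => before b a = false) := by
  induction l with
  | nil =>
    show List.Pairwise _ [x]
    simp
  | cons y ys ih =>
    rcases List.pairwise_cons.mp hl with ⟨hy, hys⟩
    show (if before x y then x :: y :: ys else y :: PySem.List.insertBy before x ys).Pairwise _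
    by_cases hxy : before x y = true
    · rw [if_pos hxy]
      refine List.pairwise_cons.mpr ⟨?_, hl⟩
      intro z hz
      rcases List.mem_cons.mp hz with rfl | hz'
      · exact h2 x z z hxy (hirr z)
      · exact h2 x y z hxy (hy z hz')
    · rw [if_neg hxy]
      refine List.pairwise_cons.mpr ⟨?_, ih hys⟩
      intro z hz
      rcases (PySem.List.mem_insertBy before x z ys).mp hz with rfl | hz'
      · exact Bool.eq_false_iff.mpr hxy
      · exact hy z hz'

theorem pvFilter_ins {α : Type} (before : α → α → Bool)
    (h1 : ∀ x y z, before x y = true → before z y = false → before x z = true)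
    (p : α → Bool) (l : List α) (x : α) (hl : l.Pairwise (fun a b => before b a = false)) :
    (PySem.List.insertBy before x l).filter p =
      if p x then PySem.List.insertBy before x (l.filter p) else l.filter p := by
  induction l with
  | nil =>
    show List.filter p [x] = if p x then PySem.List.insertBy before x [] else []
    by_cases hp : p x
    · rw [if_pos hp, List.filter_cons_of_pos hp]; rfl
    · rw [if_neg hp, List.filter_cons_of_neg hp]; rfl
  | cons y ys ih =>
    rcases List.pairwise_cons.mp hl with ⟨hy, hys⟩
    show (if before x y then x :: y :: ys else y :: PySem.List.insertBy before x ys).filter p = _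
    by_cases hxy : before x y = true
    · rw [if_pos hxy]
      by_cases hpx : p x
      · rw [if_pos hpx]
        by_cases hpy : p y
        · rw [List.filter_cons_of_pos hpx, List.filter_cons_of_pos hpy,
              pvIns_front before x (y :: List.filter p ys)
                (by intro z hz
                    rcases List.mem_cons.mp hz with rfl | hz'
                    · exact hxy
                    · exact h1 x y z hxy (hy z (List.mem_of_mem_filter hz')))]
        · rw [List.filter_cons_of_pos hpx, List.filter_cons_of_neg hpy,
              pvIns_front before x (List.filter p ys)
                (by intro z hz; exact h1 x y z hxy (hy z (List.mem_of_mem_filter hz)))]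
      · rw [if_neg hpx, List.filter_cons_of_neg hpx]
    · rw [if_neg hxy]
      by_cases hpy : p y
      · rw [List.filter_cons_of_pos hpy, List.filter_cons_of_pos hpy, ih hys]
        by_cases hpx : p x
        · rw [if_pos hpx, if_pos hpx]
          show _ = (if before x y then x :: y :: List.filter p ys
                    else y :: PySem.List.insertBy before x (List.filter p ys))
          rw [if_neg hxy]
        · rw [if_neg hpx, if_neg hpx]
      · rw [List.filter_cons_of_neg hpy, List.filter_cons_of_neg hpy, ih hys]

theorem pvFilter_foldIns {α : Type} (before : α → α → Bool)
    (hirr : ∀ a, before a a = false)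
    (h1 : ∀ x y z, before x y = true → before z y = false → before x z = true)
    (h2 : ∀ x y z, before x y = true → before z y = false → before z x = false)
    (p : α → Bool) :
    ∀ (xs : List α) (acc : List α), acc.Pairwise (fun a b => before b a = false) →
      (xs.foldl (fun a e => PySem.List.insertBy before e a) acc).filter p =
        (xs.filter p).foldl (fun a e => PySem.List.insertBy before e a) (acc.filter p) := by
  intro xs
  induction xs with
  | nil => intro acc _; rfl
  | cons x xs ih =>
    intro acc hacc
    rw [List.foldl_cons, List.filter_cons]
    by_cases hpx : p x
    · rw [if_pos hpx, List.foldl_cons, ih _ (pvIns_pairwise before hirr h2 acc x hacc),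
          pvFilter_ins before h1 p acc x hacc, if_pos hpx]
    · rw [if_neg hpx, ih _ (pvIns_pairwise before hirr h2 acc x hacc),
          pvFilter_ins before h1 p acc x hacc, if_neg hpx]

theorem pvFilter_sorted {α : Type} (xs : List α) (key : α → Int) (rev : Bool) (p : α → Bool) :
    (PySem.List.sorted xs key rev).filter p = PySem.List.sorted (xs.filter p) key rev := by
  cases rev
  · rw [PySem.List.sorted_eq_foldl_insertBy, PySem.List.sorted_eq_foldl_insertBy]
    exact pvFilter_foldIns _
      (by intro a; simp)
      (by intro x y z hxy hzy; simp only [decide_eq_true_eq, decide_eq_false_iff_not] at *; omega)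
      (by intro x y z hxy hzy; simp only [decide_eq_true_eq, decide_eq_false_iff_not] at *; omega)
      p xs [] List.Pairwise.nil
  · rw [PySem.List.sorted_rev_eq_foldl_insertBy, PySem.List.sorted_rev_eq_foldl_insertBy]
    exact pvFilter_foldIns _
      (by intro a; simp)
      (by intro x y z hxy hzy; simp only [decide_eq_true_eq, decide_eq_false_iff_not] at *; omega)
      (by intro x y z hxy hzy; simp only [decide_eq_true_eq, decide_eq_false_iff_not] at *; omega)
      p xs [] List.Pairwise.nil

theorem pvIns_map {α β : Type} (before : α → α → Bool) (f : β → α) (x : β) (l : List β) :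
    PySem.List.insertBy before (f x) (l.map f) =
      (PySem.List.insertBy (fun a b => before (f a) (f b)) x l).map f := by
  induction l with
  | nil => rfl
  | cons y ys ih =>
    show (if before (f x) (f y) then f x :: f y :: ys.map f
          else f y :: PySem.List.insertBy before (f x) (ys.map f))
        = (if before (f x) (f y) then x :: y :: ys
           else y :: PySem.List.insertBy (fun a b => before (f a) (f b)) x ys).map f
    by_cases h : before (f x) (f y) = true
    · rw [if_pos h, if_pos h]; rfl
    · rw [if_neg h, if_neg h, List.map_cons, ih]

theorem pvFoldIns_map {α β : Type} (before : α → α → Bool) (f : β → α) :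
    ∀ (xs : List β) (acc : List β),
      ((xs.map f).foldl (fun a e => PySem.List.insertBy before e a) (acc.map f)) =
        (xs.foldl (fun a e => PySem.List.insertBy (fun a b => before (f a) (f b)) e a) acc).map f := by
  intro xs
  induction xs with
  | nil => intro acc; rfl
  | cons x xs ih =>
    intro acc
    rw [List.map_cons, List.foldl_cons, List.foldl_cons, pvIns_map before f x acc, ih]

theorem pvSorted_map {α β : Type} (xs : List β) (f : β → α) (key : α → Int) (rev : Bool) :
    PySem.List.sorted (xs.map f) key rev =
      (PySem.List.sorted xs (fun b => key (f b)) rev).map f := by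
  cases rev
  · rw [PySem.List.sorted_eq_foldl_insertBy, PySem.List.sorted_eq_foldl_insertBy]
    exact pvFoldIns_map _ f xs []
  · rw [PySem.List.sorted_rev_eq_foldl_insertBy, PySem.List.sorted_rev_eq_foldl_insertBy]
    exact pvFoldIns_map _ f xs []

-- a key-sorted list is determined by its key fibers
theorem pvSorted_unique {α : Type} (k : α → Int) :
    ∀ (ys zs : List α), ys.Pairwise (fun a b => k a ≤ k b) → zs.Pairwise (fun a b => k a ≤ k b) →
      (∀ v : Int, ys.filter (fun x => decide (k x = v)) = zs.filter (fun x => decide (k x = v))) →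
      ys = zs := by
  intro ys
  induction ys with
  | nil =>
    intro zs _ _ hf
    cases zs with
    | nil => rfl
    | cons z zs' =>
      exfalso
      have h := (hf (k z)).symm
      rw [List.filter_cons_of_pos (by simp)] at h
      exact List.cons_ne_nil _ _ h
  | cons y ys' ih =>
    intro zs hy hz hf
    cases zs with
    | nil =>
      exfalso
      have h := hf (k y)
      rw [List.filter_cons_of_pos (by simp)] at h
      exact List.cons_ne_nil _ _ h
    | cons z zs' =>
      rcases List.pairwise_cons.mp hy with ⟨hyall, hy'⟩
      rcases List.pairwise_cons.mp hz with ⟨hzall, hz'⟩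
      have hyz : k y = k z := by
        have h1 : y ∈ z :: zs' := by
          have h := hf (k y)
          rw [List.filter_cons_of_pos (by simp)] at h
          exact List.mem_of_mem_filter (h ▸ List.mem_cons_self ..)
        have h2 : z ∈ y :: ys' := by
          have h := (hf (k z)).symm
          rw [List.filter_cons_of_pos (by simp)] at h
          exact List.mem_of_mem_filter (h ▸ List.mem_cons_self ..)
        have hzy : k z ≤ k y := by
          rcases List.mem_cons.mp h1 with rfl | h1'
          · rfl
          · exact hzall y h1'
        have hyz' : k y ≤ k z := by
          rcases List.mem_cons.mp h2 with rfl | h2'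
          · rfl
          · exact hyall z h2'
        omega
      have hv := hf (k y)
      rw [List.filter_cons_of_pos (by simp), List.filter_cons_of_pos (by simp [hyz])] at hv
      obtain ⟨hhead, htailv⟩ := List.cons_eq_cons.mp hv
      subst hhead
      refine congrArg (List.cons y) (ih zs' hy' hz' ?_)
      intro v
      by_cases hvv : v = k y
      · subst hvv; exact htailv
      · have h := hf v
        rw [List.filter_cons_of_neg (by simp; omega),
            List.filter_cons_of_neg (by simp; omega)] at h
        exact h

-- ---------- facts about the record table ----------

theorem pvMem_recs {ak : List String} {i : Int} {c : List (String × List Int)}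
    {x : Int × Int × String} (hx : x ∈ pvRecs ak i c) : x.1 = i := by
  rcases List.mem_map.mp hx with ⟨kk, _, rfl⟩
  rfl

theorem pvMem_sorted_recs {ak : List String} {i : Int} {c : List (String × List Int)}
    {x : Int × Int × String}
    (hx : x ∈ PySem.List.sorted (pvRecs ak i c) (fun r => r.2.1) true) : x.1 = i :=
  pvMem_recs ((PySem.List.mem_sorted ..).mp hx)

theorem pvEnum_fst_ge {α : Type} (acl : List α) (s : Int) (p : Int × α)
    (hp : p ∈ PySem.List.enumerate acl s) : s ≤ p.1 := by
  rcases (PySem.List.mem_enumerate_iff ..).mp hp with ⟨kk, _, rfl⟩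
  simp

theorem pvT_fst_ge (ak : List String) (acl : List (List (String × List Int))) (s : Int)
    (x : Int × Int × String) (hx : x ∈ pvT ak acl s) : s ≤ x.1 := by
  unfold pvT at hx
  rcases List.mem_flatMap.mp hx with ⟨p, hp, hxp⟩
  have h := pvMem_sorted_recs hxp
  rw [h]
  exact pvEnum_fst_ge acl s p hp

theorem pvT_pairwise (ak : List String) :
    ∀ (acl : List (List (String × List Int))) (s : Int),
      (pvT ak acl s).Pairwise (fun a b => a.1 ≤ b.1) := by
  intro acl
  induction acl with
  | nil => intro s; unfold pvT; rw [PySem.List.enumerate_nil]; exact List.Pairwise.nil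
  | cons c acl ih =>
    intro s
    unfold pvT
    simp only [PySem.List.enumerate_cons, List.flatMap_cons]
    refine List.pairwise_append.mpr ⟨?_, ih (s + 1), ?_⟩
    · refine List.pairwise_of_forall_mem_list ?_
      intro a ha b hb
      rw [pvMem_sorted_recs ha, pvMem_sorted_recs hb]
    · intro a ha b hb
      rw [pvMem_sorted_recs ha]
      have h := pvT_fst_ge ak acl (s + 1) b hb
      omega

theorem pvSorted_nil {α : Type} (key : α → Int) (rev : Bool) :
    PySem.List.sorted ([] : List α) key rev = [] := by cases rev <;> rfl

theorem pvSorted_if {α : Type} (key : α → Int) (c : Prop) [Decidable c] (l : List α) :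
    PySem.List.sorted (if c then l else []) key true
      = if c then PySem.List.sorted l key true else [] := by
  by_cases h : c
  · rw [if_pos h, if_pos h]
  · rw [if_neg h, if_neg h, pvSorted_nil]

theorem pvFilter_recs (ak : List String) (i : Int) (c : List (String × List Int)) (v : Int) :
    (pvRecs ak i c).filter (fun r => decide (r.1 = v)) =
      if i = v then pvRecs ak i c else [] := by
  by_cases hiv : i = v
  · subst hiv
    rw [if_pos rfl]
    refine List.filter_eq_self.mpr ?_
    intro x hx
    simp [pvMem_recs hx]
  · rw [if_neg hiv]
    refine List.filter_eq_nil_iff.mpr ?_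
    intro x hx
    simp [pvMem_recs hx, hiv]

theorem pvFibeq (ak : List String) (v : Int) :
    ∀ (acl : List (List (String × List Int))) (s : Int),
      PySem.List.sorted ((PySem.List.enumerate acl s).flatMap
          (fun p => if p.1 = v then pvRecs ak p.1 p.2 else [])) (fun r => r.2.1) true
        = (PySem.List.enumerate acl s).flatMap
            (fun p => if p.1 = v then PySem.List.sorted (pvRecs ak p.1 p.2) (fun r => r.2.1) true else []) := by
  intro acl
  induction acl with
  | nil => intro s; rw [PySem.List.enumerate_nil]; exact pvSorted_nil _ _
  | cons c acl ih =>
    intro s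
    simp only [PySem.List.enumerate_cons, List.flatMap_cons]
    by_cases hsv : s = v
    · subst hsv
      have htail : ∀ (g : Int × List (String × List Int) → List (Int × Int × String)),
          (PySem.List.enumerate acl (s + 1)).flatMap
            (fun p => if p.1 = s then g p else []) = [] := by
        intro g
        refine List.flatMap_eq_nil_iff.mpr ?_
        intro p hp
        rw [if_neg (by have h := pvEnum_fst_ge acl (s + 1) p hp; omega)]
      rw [if_pos rfl, if_pos rfl, htail (fun p => pvRecs ak p.1 p.2),
          htail (fun p => PySem.List.sorted (pvRecs ak p.1 p.2) (fun r => r.2.1) true),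
          List.append_nil, List.append_nil]
    · rw [if_neg hsv, if_neg hsv, List.nil_append, List.nil_append]
      exact ih (s + 1)

theorem pvR0_filter (ak : List String) (acl : List (List (String × List Int))) (v : Int) :
    ((PySem.List.enumerate acl 0).flatMap (fun p => pvRecs ak p.1 p.2)).filter
        (fun r => decide (r.1 = v)) =
      (PySem.List.enumerate acl 0).flatMap (fun p => if p.1 = v then pvRecs ak p.1 p.2 else []) := by
  simp only [List.filter_flatMap, pvFilter_recs]

-- the central ordering fact: the double sort equals the concatenation of per-clause sorts
theorem pvMain (ak : List String) (acl : List (List (String × List Int))) :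
    PySem.List.sorted
        (PySem.List.sorted ((PySem.List.enumerate acl 0).flatMap (fun p => pvRecs ak p.1 p.2))
          (fun r => r.2.1) true)
        (fun r => r.1)
      = pvT ak acl 0 := by
  refine pvSorted_unique (fun r => r.1) _ _ (PySem.List.sorted_pairwise _ _)
    (pvT_pairwise ak acl 0) ?_
  intro v
  simp only [pvFilter_sorted]
  rw [pvR0_filter]
  have hall : ∀ x ∈ PySem.List.sorted ((PySem.List.enumerate acl 0).flatMap
      (fun p => if p.1 = v then pvRecs ak p.1 p.2 else [])) (fun r => r.2.1) true, x.1 = v := by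
    intro x hx
    have hx' := (PySem.List.mem_sorted ..).mp hx
    rcases List.mem_flatMap.mp hx' with ⟨p, _, hxp⟩
    by_cases h : p.1 = v
    · rw [if_pos h] at hxp; rw [pvMem_recs hxp, h]
    · rw [if_neg h] at hxp; cases hxp
  rw [PySem.List.sorted_eq_self_of_pairwise _ _
        (List.pairwise_of_forall_mem_list (fun a ha b hb => by rw [hall a ha, hall b hb]))]
  rw [pvFibeq]
  unfold pvT
  simp only [List.filter_flatMap, pvFilter_sorted, pvFilter_recs, pvSorted_if]

-- ---------- shape of port A ----------

theorem pvFoldl_flatMap {α β γ : Type} (g : α → List β) (f : γ → β → γ) :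
    ∀ (l : List α) (i : γ), (l.flatMap g).foldl f i = l.foldl (fun a c => (g c).foldl f a) i := by
  intro l
  induction l with
  | nil => intro i; rfl
  | cons x xs ih => intro i; rw [List.flatMap_cons, List.foldl_append, List.foldl_cons, ih]

theorem pvA_eq (acl : List (List (String × List Int))) (ak : List String) :
    get_key_list acl ak = (pvLA ak acl).foldl pvSadd [] := by
  unfold get_key_list pvLA
  rw [pvFoldl_flatMap]
  refine PySem.List.foldl_congr_mem _ _ _ _ ?_
  intro kl c _
  show (PySem.List.sorted ((c.map Prod.fst).foldl (fun kg key =>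
          if ak.isEmpty || ak.contains key then
            kg ++ [(key, pvGold c key)] else kg) []) (fun x => x.2) true).foldl
        (fun kl add_key => if kl.contains add_key.1 then kl else kl ++ [add_key.1]) kl
      = ((PySem.List.sorted (pvPairs ak c) (fun x => x.2) true).map Prod.fst).foldl pvSadd kl
  rw [PySem.List.foldl_append_if (fun key => ak.isEmpty || ak.contains key)
        (fun key => (key, pvGold c key)) (c.map Prod.fst) [], List.nil_append, List.foldl_map]
  rfl

-- ---------- shape of port B ----------

theorem pvPairFold :
    ∀ (l : List (Int × Int × String)) (s : List String),
      (l.foldl (fun (st : List String × PySem.Set String) r =>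
          if PySem.Set.contains st.2 r.2.2 then st
          else (st.1 ++ [r.2.2], PySem.Set.add st.2 r.2.2)) (s, s)).1
        = l.foldl (fun kl r => pvSadd kl r.2.2) s := by
  intro l
  induction l with
  | nil => intro s; rfl
  | cons r l ih =>
    intro s
    rw [List.foldl_cons, List.foldl_cons]
    by_cases h : PySem.Set.contains s r.2.2 = true
    · rw [if_pos h]
      have h' : s.contains r.2.2 = true := h
      have hs : pvSadd s r.2.2 = s := by unfold pvSadd; rw [if_pos h']
      rw [hs]
      exact ih s
    · rw [if_neg h]
      have h' : ¬s.contains r.2.2 = true := h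
      have hadd : PySem.Set.add s r.2.2 = s ++ [r.2.2] := by
        unfold PySem.Set.add; rw [if_neg h]
      have hsadd : pvSadd s r.2.2 = s ++ [r.2.2] := by unfold pvSadd; rw [if_neg h']
      rw [hadd, hsadd]
      exact ih (s ++ [r.2.2])

theorem pvB_eq (acl : List (List (String × List Int))) (ak : List String) :
    get_key_list_alt acl ak =
      ((PySem.List.sorted
          (PySem.List.sorted ((PySem.List.enumerate acl 0).flatMap (fun p => pvRecs ak p.1 p.2))
            (fun r => r.2.1) true)
          (fun r => r.1)).map (fun r => r.2.2)).foldl pvSadd [] := by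
  unfold get_key_list_alt
  have hrec : (PySem.List.enumerate acl 0).foldl (fun rs p =>
      (p.2.map Prod.fst).foldl (fun rs key =>
        if ak.isEmpty || ak.contains key then
          rs ++ [(p.1, pvGold p.2 key, key)] else rs) rs) ([] : List (Int × Int × String))
      = (PySem.List.enumerate acl 0).flatMap (fun p => pvRecs ak p.1 p.2) := by
    have h2 : (PySem.List.enumerate acl 0).foldl (fun rs p =>
        (p.2.map Prod.fst).foldl (fun rs key =>
          if ak.isEmpty || ak.contains key then
            rs ++ [(p.1, pvGold p.2 key, key)] else rs) rs) ([] : List (Int × Int × String))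
        = (PySem.List.enumerate acl 0).foldl (fun rs p => rs ++ pvRecs ak p.1 p.2) [] := by
      refine PySem.List.foldl_congr_mem _ _ _ _ ?_
      intro rs p _
      exact PySem.List.foldl_append_if (fun key => ak.isEmpty || ak.contains key)
        (fun key => (p.1, pvGold p.2 key, key)) (p.2.map Prod.fst) rs
    rw [h2, PySem.List.foldl_append_eq_flatMap (fun p => pvRecs ak p.1 p.2)
          (PySem.List.enumerate acl 0) [], List.nil_append]
  show ((PySem.List.sorted (PySem.List.sorted ((PySem.List.enumerate acl 0).foldl (fun rs p =>
      (p.2.map Prod.fst).foldl (fun rs key =>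
        if ak.isEmpty || ak.contains key then
          rs ++ [(p.1, pvGold p.2 key, key)] else rs) rs) []) (fun r => r.2.1) true)
        (fun r => r.1)).foldl (fun (st : List String × PySem.Set String) r =>
      if PySem.Set.contains st.2 r.2.2 then st
      else (st.1 ++ [r.2.2], PySem.Set.add st.2 r.2.2)) ([], PySem.Set.empty)).1 = _
  rw [hrec,
      show (([] : List String), (PySem.Set.empty : PySem.Set String))
          = (([] : List String), ([] : List String)) from rfl,
      pvPairFold, List.foldl_map]

-- per-clause: the sorted record block projects to the sorted pair block
theorem pvBlock_proj (ak : List String) (i : Int) (c : List (String × List Int)) :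
    (PySem.List.sorted (pvRecs ak i c) (fun r => r.2.1) true).map (fun r => r.2.2)
      = (PySem.List.sorted (pvPairs ak c) (fun x => x.2) true).map Prod.fst := by
  have hrp : pvRecs ak i c = (pvPairs ak c).map (fun q => (i, q.2, q.1)) := by
    unfold pvRecs pvPairs
    rw [List.map_map]
    rfl
  rw [hrp, pvSorted_map (pvPairs ak c) (fun q => (i, q.2, q.1)) (fun r => r.2.1) true,
      List.map_map]
  rfl

theorem pvT_proj (ak : List String) :
    ∀ (acl : List (List (String × List Int))) (s : Int),
      (pvT ak acl s).map (fun r => r.2.2) = pvLA ak acl := by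
  intro acl
  induction acl with
  | nil => intro s; unfold pvT pvLA; rw [PySem.List.enumerate_nil]; rfl
  | cons c acl ih =>
    intro s
    unfold pvT pvLA
    simp only [PySem.List.enumerate_cons, List.flatMap_cons, List.map_append]
    rw [pvBlock_proj]
    exact congrArg (fun t => (PySem.List.sorted (pvPairs ak c) (fun x => x.2) true).map Prod.fst ++ t)
      (ih (s + 1))

-- ===== VERDICT (by name: the statement is the Claim_ definition above) =====
theorem get_key_list_spec : Claim_equal_get_key_list := by
  intro acl ak _ _
  show get_key_list acl ak = get_key_list_alt acl ak
  rw [pvA_eq, pvB_eq, pvMain, pvT_proj]
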